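-- pv_equiv track=rewrite | github.com/NP-chaonay/PythonPkg-np_chaonay | np_chaonay/main.py | is_decimal_string
-- ===== SOURCE A (Python) =====
-- def alternative_isinstance(obj_name,types,value):
-- 	'''Alternative usage of Python isinstance builtin-function for type checking. Check if value is the given type, else will raise the exception.
--
-- 	Arguments:
-- 	- obj_name (not-empty str): Reported variable name when type checking is not pass.
-- 	- types (not-empty tuple consists of types): Tuple of types that the given object should be matched or inherited from one of these.
-- 	- value: Any object to check its type.
-- 	'''
-- 	if type(obj_name)!=str : raise TypeError('Inputted value for this function arugment \'obj_name\' must be str.')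
-- 	if type(types)!=tuple : raise TypeError('Inputted value for this function arugment \'types\' must be tuple.')
-- 	if not obj_name: raise ValueError('Inputted value for this function arugment \'obj_name\' must not be empty string.')
-- 	if not types: raise ValueError('Inputted value for this function arugment \'types\' must not be empty tuple.')
-- 	for type_ in types:
-- 		if type(type_)!=type: raise TypeError('Inputted tuple for this function arugment \'types\' must only consists of types only.')
-- 	if not isinstance(value,types):
-- 		msg=[]
-- 		for type_ in types:
-- 			msg+=[type_.__name__+'-alike']
-- 		if len(msg)==1:
-- 			msg=msg[0]
-- 		elif len(msg)==2:
-- 			msg=msg[0]+' or '+msg[1]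
-- 		else:
-- 			msg=', '.join(msg[:-1])+', or '+msg[-1]
-- 		raise TypeError('Inputted value for \''+obj_name+'\' should be '+msg+'.')
--
-- def is_decimal_string(string):
-- 	# QualityCheckTags: DOCS,INPUTCHECK,RETURNVALUEDOCS,OVERALL
-- 	"""Check if inputted string is decimal
--
-- 	Arguments:
-- 	- string (str-alike): Text to check
--
-- 	Returns:
-- 	True if inputted string is decimal, else False.
--
-- 	Examples:
-- 	- +5, -1, 0 -> True
-- 	- 5.2, 0.44, .33, +33. -> True
-- 	"""
-- 	## Type checking
-- 	alternative_isinstance('string',(str,),string)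
-- 	##
-- 	# For empty string
-- 	if not string: return False
-- 	# Left-most digit
-- 	if string[0] not in ['-','+','.','0','1','2','3','4','5','6','7','8','9']: return False
-- 	# Other digits
-- 	for i in string[1:]:
-- 		if i not in ['.','0','1','2','3','4','5','6','7','8','9']: return False
-- 	# Check if has multiple '.'
-- 	c=0
-- 	for i in string:
-- 		if i=='.': c+=1
-- 	if c>1: return False
-- 	return True
-- ===== SOURCE B (Python) =====
-- import re
--
-- _DECIMAL_RE = re.compile(r'[+-]?[0-9]*\.?[0-9]*')
--
-- def is_decimal_string(string):
--     if not isinstance(string, str):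
--         raise TypeError("Inputted value for 'string' should be str-alike.")
--     return bool(string) and _DECIMAL_RE.fullmatch(string) is not None
-- ===== Notes on version B (the rewrite author's own statement) =====
-- stated objective: idiomatic
-- what changed: Replaces the empty-check, two membership-scan loops and a separate dot-counting pass with a single regex fullmatch of [+-]?[0-9]*\.?[0-9]*.
import Mathlib
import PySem

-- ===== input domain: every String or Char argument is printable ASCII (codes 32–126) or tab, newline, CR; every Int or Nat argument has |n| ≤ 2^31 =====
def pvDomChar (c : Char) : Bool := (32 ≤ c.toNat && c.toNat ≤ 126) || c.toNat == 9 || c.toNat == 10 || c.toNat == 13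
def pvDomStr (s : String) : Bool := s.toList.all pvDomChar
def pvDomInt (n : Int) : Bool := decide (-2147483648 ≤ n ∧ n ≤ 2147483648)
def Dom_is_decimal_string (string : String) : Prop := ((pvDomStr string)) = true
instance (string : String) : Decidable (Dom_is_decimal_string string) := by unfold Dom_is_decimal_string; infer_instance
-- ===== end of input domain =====

-- B replaces A's empty-check, two membership-scan loops and a separate dot-counting pass
-- with a single regex fullmatch of [+-]?[0-9]*\.?[0-9]* (more idiomatic; both versions
-- raise TypeError on non-str input, which is outside the String domain modelled here).

-- ===== PORT A =====
-- A: empty → False; first char must be sign/dot/digit; every later char dot/digit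
-- (early-return loop = List.all); then count '.' over the whole string with a fold,
-- count > 1 → False, else True.
def is_decimal_string (string : String) : Bool :=
  match string.toList with
  | [] => false
  | c :: rest =>
    if !(['-','+','.','0','1','2','3','4','5','6','7','8','9'].contains c) then false
    else if !(rest.all (fun i => ['.','0','1','2','3','4','5','6','7','8','9'].contains i)) then false
    else
      let cnt := (c :: rest).foldl (fun acc i => if i = '.' then acc + 1 else acc) 0
      if cnt > 1 then false else true

-- ===== PORT B =====
-- Hand-written matcher for the anchored regex [+-]?[0-9]*\.?[0-9]* (exact here:
-- greedy left-to-right matching needs no backtracking since '.' is not a digit):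
-- after the optional sign, drop the maximal digit run; then either the input ends,
-- or one '.' followed by a final maximal digit run reaching the end.
def pvTailMatch (t : List Char) : Bool :=
  match t.dropWhile Char.isDigit with
  | [] => true
  | c :: r => c == '.' && (r.dropWhile Char.isDigit).isEmpty

def pvReMatch (cs : List Char) : Bool :=
  match cs with
  | c :: r => if c == '+' || c == '-' then pvTailMatch r else pvTailMatch cs
  | [] => pvTailMatch cs

def is_decimal_string_alt (string : String) : Bool :=
  !string.toList.isEmpty && pvReMatch string.toList

-- ===== PRECONDITION & SPEC =====
def Spec_is_decimal_string (string : String) (out : Bool) : Prop := out = is_decimal_string_alt string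
instance (string : String) (out : Bool) : Decidable (Spec_is_decimal_string string out) := by unfold Spec_is_decimal_string; infer_instance

-- ===== CLAIM (what is proved, stated in full; the proofs are below) =====
def Claim_equal_is_decimal_string : Prop := ∀ (string : String), Dom_is_decimal_string string → Spec_is_decimal_string string (is_decimal_string string)

-- ===== LEMMAS AND PROOFS =====

-- the membership test A applies to every character after the first
def pvTail (i : Char) : Bool := ['.','0','1','2','3','4','5','6','7','8','9'].contains i

theorem char_eq_iff_toNat (c d : Char) : (c = d) ↔ c.toNat = d.toNat := by
  rw [Char.ext_iff, Char.toNat, Char.toNat, UInt32.toNat_inj]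

theorem pvTail_eq (c : Char) : pvTail c = (c.isDigit || c == '.') := by
  unfold pvTail
  simp only [List.contains_cons, List.contains_nil, Bool.or_false, Char.isDigit]
  rw [Bool.eq_iff_iff]
  simp only [Bool.or_eq_true, Bool.and_eq_true, beq_iff_eq, decide_eq_true_eq,
    char_eq_iff_toNat, ge_iff_le, UInt32.le_iff_toNat_le]
  have h0 : ('.' : Char).toNat = 46 := rfl
  have h1 : ('0' : Char).toNat = 48 := rfl
  have h2 : ('1' : Char).toNat = 49 := rfl
  have h3 : ('2' : Char).toNat = 50 := rfl
  have h4 : ('3' : Char).toNat = 51 := rfl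
  have h5 : ('4' : Char).toNat = 52 := rfl
  have h6 : ('5' : Char).toNat = 53 := rfl
  have h7 : ('6' : Char).toNat = 54 := rfl
  have h8 : ('7' : Char).toNat = 55 := rfl
  have h9 : ('8' : Char).toNat = 56 := rfl
  have ha : ('9' : Char).toNat = 57 := rfl
  have hv0 : ('0' : Char).val.toNat = 48 := rfl
  have hv9 : ('9' : Char).val.toNat = 57 := rfl
  have hcv : c.val.toNat = c.toNat := rfl
  rw [h0, h1, h2, h3, h4, h5, h6, h7, h8, h9, ha, hv0, hv9, hcv]
  omega

theorem pvHead_eq (c : Char) :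
    (['-','+','.','0','1','2','3','4','5','6','7','8','9'].contains c)
      = (c == '+' || c == '-' || pvTail c) := by
  rw [pvTail_eq]
  simp only [List.contains_cons, List.contains_nil, Bool.or_false, Char.isDigit]
  rw [Bool.eq_iff_iff]
  simp only [Bool.or_eq_true, Bool.and_eq_true, beq_iff_eq, decide_eq_true_eq,
    char_eq_iff_toNat, ge_iff_le, UInt32.le_iff_toNat_le]
  have hm : ('-' : Char).toNat = 45 := rfl
  have hp : ('+' : Char).toNat = 43 := rfl
  have h0 : ('.' : Char).toNat = 46 := rfl
  have h1 : ('0' : Char).toNat = 48 := rfl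
  have h2 : ('1' : Char).toNat = 49 := rfl
  have h3 : ('2' : Char).toNat = 50 := rfl
  have h4 : ('3' : Char).toNat = 51 := rfl
  have h5 : ('4' : Char).toNat = 52 := rfl
  have h6 : ('5' : Char).toNat = 53 := rfl
  have h7 : ('6' : Char).toNat = 54 := rfl
  have h8 : ('7' : Char).toNat = 55 := rfl
  have h9 : ('8' : Char).toNat = 56 := rfl
  have ha : ('9' : Char).toNat = 57 := rfl
  have hv0 : ('0' : Char).val.toNat = 48 := rfl
  have hv9 : ('9' : Char).val.toNat = 57 := rfl
  have hcv : c.val.toNat = c.toNat := rfl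
  rw [hm, hp, h0, h1, h2, h3, h4, h5, h6, h7, h8, h9, ha, hv0, hv9, hcv]
  omega

theorem pvDigit_ne_dot {c : Char} (h : c.isDigit = true) : c ≠ '.' := by
  intro he
  rw [he] at h
  exact absurd h (by decide)

theorem pvFoldl_count (cs : List Char) (n : Nat) :
    cs.foldl (fun acc i => if i = '.' then acc + 1 else acc) n = n + cs.count '.' := by
  induction cs generalizing n with
  | nil => simp
  | cons c r ih =>
    simp only [List.foldl_cons, ih, List.count_cons]
    by_cases h : c = '.'
    · subst h; simp; omega
    · simp [h]

theorem pvAllDigit (r : List Char) :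
    r.all Char.isDigit = (r.all pvTail && (r.count '.' == 0)) := by
  induction r with
  | nil => simp
  | cons c t ih =>
    by_cases hd : c.isDigit
    · have hdot : c ≠ '.' := pvDigit_ne_dot hd
      simp [List.all_cons, hd, pvTail_eq, hdot, ih]
    · by_cases hc : c = '.'
      · subst hc
        simp [List.all_cons, Char.isDigit, pvTail_eq]
      · simp [List.all_cons, hd, pvTail_eq, hc]

theorem pvTailMatch_eq (t : List Char) :
    pvTailMatch t = (t.all pvTail && decide (t.count '.' ≤ 1)) := by
  induction t with
  | nil => simp [pvTailMatch]
  | cons c r ih =>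
    by_cases hd : c.isDigit
    · have hdot : c ≠ '.' := pvDigit_ne_dot hd
      have hstep : pvTailMatch (c :: r) = pvTailMatch r := by
        simp [pvTailMatch, hd]
      rw [hstep, ih]
      simp [List.all_cons, List.count_cons, pvTail_eq, hd, hdot]
    · have hstep : pvTailMatch (c :: r)
          = (c == '.' && (r.dropWhile Char.isDigit).isEmpty) := by
        simp [pvTailMatch, List.dropWhile_cons, hd]
      rw [hstep]
      by_cases hc : c = '.'
      · subst hc
        have hemp : (r.dropWhile Char.isDigit).isEmpty = r.all Char.isDigit := by
          rw [Bool.eq_iff_iff, List.isEmpty_iff, List.dropWhile_eq_nil_iff,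
            List.all_eq_true]
        rw [Bool.and_comm]
        simp only [beq_self_eq_true, Bool.and_true, hemp, pvAllDigit,
          List.all_cons, List.count_cons]
        have hpt : pvTail '.' = true := by decide
        rw [hpt]
        rcases ha : r.all pvTail
        · simp
        · simp only [Bool.true_and]
          rcases hn : r.count '.' with _ | m <;> simp
      · have hff : (c == '.') = false := by simp [hc]
        rw [hff]
        simp [List.all_cons, pvTail_eq, hd, hc]

theorem pvShape (x y : Bool) (n : Nat) :
    (if !x then false else if !y then false else if n > 1 then false else true)
      = (x && y && decide (n ≤ 1)) := by
  rcases x <;> rcases y <;> by_cases h : n > 1 <;> simp [h] <;> omega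

theorem is_decimal_string_spec : Claim_equal_is_decimal_string := by
  intro s _
  unfold Spec_is_decimal_string is_decimal_string is_decimal_string_alt pvReMatch
  rcases hcs : s.toList with _ | ⟨c, rest⟩
  · simp
  · simp only [List.isEmpty_cons, Bool.not_false, Bool.true_and]
    rw [pvShape, pvHead_eq, pvFoldl_count, Nat.zero_add]
    have hall : (rest.all fun i => ['.','0','1','2','3','4','5','6','7','8','9'].contains i)
        = rest.all pvTail := rfl
    rw [hall]
    by_cases hsign : (c == '+' || c == '-') = true
    · rw [if_pos hsign, pvTailMatch_eq]
      have hc' : c = '+' ∨ c = '-' := by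
        rcases (Bool.or_eq_true _ _).mp hsign with h | h
        · exact Or.inl (beq_iff_eq.mp h)
        · exact Or.inr (beq_iff_eq.mp h)
      have hcnt : (c :: rest).count '.' = rest.count '.' := by
        rcases hc' with h | h <;> subst h <;> simp
      rw [hcnt, hsign, Bool.true_or, Bool.true_and]
    · rw [if_neg hsign, pvTailMatch_eq, List.all_cons]
      rw [Bool.or_eq_true, not_or] at hsign
      obtain ⟨h1, h2⟩ := hsign
      simp only [Bool.not_eq_true] at h1 h2
      rw [h1, h2, Bool.false_or, Bool.false_or]
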